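-- pv_equiv track=rewrite | github.com/Ritesh7767/dataStructure | sliding.py | minString
-- ===== SOURCE A (Python) =====
-- def minString(string):
--
--     mapping = {
--         "A": "B",
--         "C": "D"
--     }
--     stack = []
--     for char in string:
--
--         if stack and (stack[-1] == "A" or stack[-1] == "C"):
--             if char == mapping[stack[-1]]:
--                 stack.pop()
--             else:
--                 stack.append(char)
--         else:
--             stack.append(char)
--
--     return "".join(stack)
-- ===== SOURCE B (Python) =====
-- def minString(string):
--     s = "".join(string)
--     while "AB" in s or "CD" in s:
--         s = s.replace("AB", "").replace("CD", "")
--     return s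
-- ===== Notes on version B (the rewrite author's own statement) =====
-- stated objective: simpler
-- what changed: Replaced the one-pass explicit stack with a repeated str.replace of 'AB'/'CD' to a fixpoint, maintaining only the running string; a timing run measured B faster because str.replace scans in C while A steps char-by-char in Python.
import Mathlib
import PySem

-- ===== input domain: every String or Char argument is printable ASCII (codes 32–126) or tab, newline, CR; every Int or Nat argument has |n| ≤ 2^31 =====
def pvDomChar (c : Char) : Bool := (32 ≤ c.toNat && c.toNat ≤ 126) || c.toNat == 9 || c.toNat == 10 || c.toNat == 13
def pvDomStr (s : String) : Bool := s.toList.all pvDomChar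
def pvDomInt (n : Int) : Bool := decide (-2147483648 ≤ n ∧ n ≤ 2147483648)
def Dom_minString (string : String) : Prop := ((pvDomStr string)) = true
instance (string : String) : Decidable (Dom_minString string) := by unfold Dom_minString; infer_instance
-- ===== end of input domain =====

-- B replaces A's one-pass explicit stack by repeated str.replace of "AB"/"CD" to a
-- fixpoint (simpler: only the running string is maintained); same return value on all inputs.

-- ===== PORT A =====
-- Python's dict {"A": "B", "C": "D"}; the loop iterates chars, so keys/values are Chars here.
def pyMappingA : PySem.Dict Char Char := PySem.Dict.mk [('A', 'B'), ('C', 'D')]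

-- the loop body; the stack is kept top-first (Python appends/pops at the end), so
-- append = cons and stack[-1] = head; ''.join(stack) = String.ofList stack.reverse.
-- mapping[stack[-1]] is only evaluated under the guard, where the key is present, so getD is exact.
def stepA (stack : List Char) (char : Char) : List Char :=
  match stack with
  | top :: rest =>
      if top = 'A' || top = 'C' then
        if char = pyMappingA.getD top ' ' then rest else char :: top :: rest
      else char :: top :: rest
  | [] => [char]

def minString (string : String) : String :=
  String.ofList ((string.toList.foldl stepA []).reverse)

-- ===== PORT B =====
-- ''.join(string) over a str argument is the string itself, so it is the identity here.
-- "AB" in s → PySem.Chars.isIn; s.replace(old, "") → PySem.Chars.replace.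
def bStep (s : List Char) : List Char :=
  PySem.Chars.replace (PySem.Chars.replace s ['A', 'B'] []) ['C', 'D'] []

theorem go_len_le (a b : Char) : ∀ (fuel : Nat) (l acc : List Char),
    (PySem.Chars.replace.go [a, b] [] fuel l acc).length ≤ acc.length + l.length := by
  intro fuel
  induction fuel with
  | zero => intro l acc; simp [PySem.Chars.replace.go]
  | succ n ih =>
    intro l acc
    cases l with
    | nil => simp [PySem.Chars.replace.go]
    | cons c t =>
      rw [PySem.Chars.replace.go]
      by_cases hp : List.isPrefixOf [a, b] (c :: t) = true
      · obtain ⟨u, hu⟩ := List.isPrefixOf_iff_prefix.mp hp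
        obtain ⟨hca, htu⟩ : a = c ∧ b :: u = t := by simpa using hu
        subst hca; subst htu
        simp only [hp, if_true]
        have := ih (List.drop [a, b].length (a :: b :: u)) ([].reverse ++ acc)
        simp only [List.length_cons, List.length_nil, List.drop_succ_cons, List.drop_zero,
          List.reverse_nil, List.nil_append] at this ⊢
        omega
      · simp only [hp, Bool.false_eq_true, if_false]
        have := ih t (c :: acc)
        simp only [List.length_cons] at this ⊢
        omega

theorem go_eq_of_not_infix (a b : Char) : ∀ (fuel : Nat) (l acc : List Char),
    ¬ [a, b] <:+: l →
    PySem.Chars.replace.go [a, b] [] fuel l acc = acc.reverse ++ l := by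
  intro fuel
  induction fuel with
  | zero => intro l acc _; rw [PySem.Chars.replace.go]
  | succ n ih =>
    intro l acc hnot
    cases l with
    | nil => simp [PySem.Chars.replace.go]
    | cons c t =>
      rw [PySem.Chars.replace.go]
      by_cases hp : List.isPrefixOf [a, b] (c :: t) = true
      · exact absurd (List.isPrefixOf_iff_prefix.mp hp).isInfix hnot
      · simp only [hp, Bool.false_eq_true, if_false]
        have ht : ¬ [a, b] <:+: t := fun h => hnot (h.trans (List.suffix_cons c t).isInfix)
        rw [ih t (c :: acc) ht]
        simp

theorem go_len_lt_of_infix (a b : Char) : ∀ (fuel : Nat) (l acc : List Char),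
    l.length ≤ fuel → [a, b] <:+: l →
    (PySem.Chars.replace.go [a, b] [] fuel l acc).length < acc.length + l.length := by
  intro fuel
  induction fuel with
  | zero =>
    intro l acc hl hin
    have : l = [] := List.eq_nil_of_length_eq_zero (Nat.le_zero.mp hl)
    subst this
    have := hin.length_le
    simp at this
  | succ n ih =>
    intro l acc hl hin
    cases l with
    | nil =>
      have := hin.length_le
      simp at this
    | cons c t =>
      rw [PySem.Chars.replace.go]
      by_cases hp : List.isPrefixOf [a, b] (c :: t) = true
      · obtain ⟨u, hu⟩ := List.isPrefixOf_iff_prefix.mp hp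
        obtain ⟨hca, htu⟩ : a = c ∧ b :: u = t := by simpa using hu
        subst hca; subst htu
        simp only [hp, if_true]
        have := go_len_le a b n (List.drop [a, b].length (a :: b :: u)) ([].reverse ++ acc)
        simp only [List.length_cons, List.length_nil, List.drop_succ_cons, List.drop_zero,
          List.reverse_nil, List.nil_append] at this ⊢
        omega
      · simp only [hp, Bool.false_eq_true, if_false]
        have ht : [a, b] <:+: t := by
          rcases List.infix_cons_iff.mp hin with h | h
          · exact absurd (List.isPrefixOf_iff_prefix.mpr h) hp
          · exact h
        have := ih t (c :: acc) (by simp only [List.length_cons] at hl; omega) ht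
        simp only [List.length_cons] at this ⊢
        omega

theorem replace_len_le (a b : Char) (l : List Char) :
    (PySem.Chars.replace l [a, b] []).length ≤ l.length := by
  unfold PySem.Chars.replace
  simp only [List.isEmpty_cons, Bool.false_eq_true, if_false]
  have := go_len_le a b l.length l []
  simpa using this

theorem replace_len_lt (a b : Char) (l : List Char) (h : [a, b] <:+: l) :
    (PySem.Chars.replace l [a, b] []).length < l.length := by
  unfold PySem.Chars.replace
  simp only [List.isEmpty_cons, Bool.false_eq_true, if_false]
  have := go_len_lt_of_infix a b l.length l [] (le_refl _) h
  simpa using this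

theorem replace_eq_of_not_infix (a b : Char) (l : List Char) (h : ¬ [a, b] <:+: l) :
    PySem.Chars.replace l [a, b] [] = l := by
  unfold PySem.Chars.replace
  simp only [List.isEmpty_cons, Bool.false_eq_true, if_false]
  rw [go_eq_of_not_infix a b l.length l [] h]
  simp

def bLenLt (s : List Char) (h : PySem.Chars.isIn ['A', 'B'] s || PySem.Chars.isIn ['C', 'D'] s) :
    (bStep s).length < s.length := by
  unfold bStep
  by_cases hab : ['A', 'B'] <:+: s
  · calc (PySem.Chars.replace (PySem.Chars.replace s ['A', 'B'] []) ['C', 'D'] []).length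
        ≤ (PySem.Chars.replace s ['A', 'B'] []).length := replace_len_le _ _ _
      _ < s.length := replace_len_lt _ _ _ hab
  · have hs1 : PySem.Chars.replace s ['A', 'B'] [] = s := replace_eq_of_not_infix _ _ _ hab
    have hcd : ['C', 'D'] <:+: s := by
      have h1 : PySem.Chars.isIn ['A', 'B'] s = false := (PySem.Chars.isIn_eq_false_iff _ _).mpr hab
      rw [h1, Bool.false_or] at h
      exact (PySem.Chars.isIn_iff_infix _ _).mp h
    rw [hs1]
    exact replace_len_lt _ _ _ hcd

def bLoop (s : List Char) : List Char :=
  if h : PySem.Chars.isIn ['A', 'B'] s || PySem.Chars.isIn ['C', 'D'] s then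
    bLoop (bStep s)
  else s
termination_by s.length
decreasing_by exact bLenLt s h

def minString_alt (string : String) : String :=
  String.ofList (bLoop string.toList)

-- ===== PRECONDITION & SPEC =====
def Spec_minString (string : String) (out : String) : Prop := out = minString_alt string
instance (string : String) (out : String) : Decidable (Spec_minString string out) := by unfold Spec_minString; infer_instance

-- ===== CLAIM (what is proved, stated in full; the proofs are below) =====
def Claim_equal_minString : Prop := ∀ (string : String), Dom_minString string → Spec_minString string (minString string)

-- ===== LEMMAS AND PROOFS =====

-- "a reducible adjacent pair": exactly the condition under which A's stack pops.
def red (a b : Char) : Bool := (a == 'A' && b == 'B') || (a == 'C' && b == 'D')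

theorem stepA_eq_red (st : List Char) (c : Char) :
    stepA st c = match st with
      | t :: rest => if red t c then rest else c :: t :: rest
      | [] => [c] := by
  cases st with
  | nil => rfl
  | cons t rest =>
    by_cases hA : t = 'A'
    · subst hA
      simp only [stepA, red, show pyMappingA.getD 'A' ' ' = 'B' from by decide]
      by_cases hc : c = 'B' <;> simp [hc]
    · by_cases hC : t = 'C'
      · subst hC
        simp only [stepA, red, show pyMappingA.getD 'C' ' ' = 'D' from by decide]
        by_cases hc : c = 'D' <;> simp [hc]
      · simp only [stepA, red]
        simp [hA, hC]

theorem stepA_push (st : List Char) (c : Char)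
    (h : ∀ t r, st = t :: r → red t c = false) : stepA st c = c :: st := by
  rw [stepA_eq_red]
  cases st with
  | nil => rfl
  | cons t r => simp [h t r rfl]

theorem cancel_AB (st : List Char) : stepA (stepA st 'A') 'B' = st := by
  have h1 : stepA st 'A' = 'A' :: st := by
    apply stepA_push
    intro t r ht
    simp only [red]
    by_cases hA : t = 'A' <;> by_cases hC : t = 'C' <;> simp [hA, hC]
  rw [h1, stepA_eq_red]
  simp [red]

theorem cancel_CD (st : List Char) : stepA (stepA st 'C') 'D' = st := by
  have h1 : stepA st 'C' = 'C' :: st := by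
    apply stepA_push
    intro t r ht
    simp only [red]
    by_cases hA : t = 'A' <;> by_cases hC : t = 'C' <;> simp [hA, hC]
  rw [h1, stepA_eq_red]
  simp [red]

theorem fold_del_AB (x y : List Char) (st : List Char) :
    (x ++ 'A' :: 'B' :: y).foldl stepA st = (x ++ y).foldl stepA st := by
  rw [List.foldl_append, List.foldl_append]
  simp only [List.foldl_cons, cancel_AB]

theorem fold_del_CD (x y : List Char) (st : List Char) :
    (x ++ 'C' :: 'D' :: y).foldl stepA st = (x ++ y).foldl stepA st := by
  rw [List.foldl_append, List.foldl_append]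
  simp only [List.foldl_cons, cancel_CD]

-- the recursion of PySem.Chars.replace with new = [] preserves A's fold
theorem go_fold (a b : Char)
    (del : ∀ x y st, (x ++ a :: b :: y).foldl stepA st = (x ++ y).foldl stepA st) :
    ∀ (fuel : Nat) (l acc st : List Char), l.length ≤ fuel →
    (PySem.Chars.replace.go [a, b] [] fuel l acc).foldl stepA st =
      (acc.reverse ++ l).foldl stepA st := by
  intro fuel
  induction fuel with
  | zero =>
    intro l acc st hl
    have hnil : l = [] := List.eq_nil_of_length_eq_zero (Nat.le_zero.mp hl)
    subst hnil
    simp [PySem.Chars.replace.go]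
  | succ n ih =>
    intro l acc st hl
    cases l with
    | nil => simp [PySem.Chars.replace.go]
    | cons c t =>
      rw [PySem.Chars.replace.go]
      by_cases hp : List.isPrefixOf [a, b] (c :: t) = true
      · obtain ⟨u, hu⟩ := List.isPrefixOf_iff_prefix.mp hp
        obtain ⟨hca, htu⟩ : a = c ∧ b :: u = t := by
          simpa using hu
        subst hca; subst htu
        simp only [hp, if_true]
        have hlen : u.length ≤ n := by
          simp only [List.length_cons] at hl; omega
        have := ih (List.drop [a, b].length (a :: b :: u)) ([].reverse ++ acc) st
          (by simpa using hlen)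
        simp only [List.length_cons, List.length_nil, List.drop_succ_cons,
          List.drop_zero, List.reverse_nil, List.nil_append] at this ⊢
        rw [this, del]
      · simp only [hp, if_false, Bool.false_eq_true]
        have hlen : t.length ≤ n := by
          simp only [List.length_cons] at hl; omega
        rw [ih t (c :: acc) st hlen]
        simp

theorem go_fold_AB : ∀ (fuel : Nat) (l acc st : List Char), l.length ≤ fuel →
    (PySem.Chars.replace.go ['A','B'] [] fuel l acc).foldl stepA st =
      (acc.reverse ++ l).foldl stepA st := by
  exact go_fold 'A' 'B' fold_del_AB

theorem go_fold_CD : ∀ (fuel : Nat) (l acc st : List Char), l.length ≤ fuel →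
    (PySem.Chars.replace.go ['C','D'] [] fuel l acc).foldl stepA st =
      (acc.reverse ++ l).foldl stepA st := by
  exact go_fold 'C' 'D' fold_del_CD

theorem bStep_fold (s : List Char) (st : List Char) :
    (bStep s).foldl stepA st = s.foldl stepA st := by
  unfold bStep PySem.Chars.replace
  simp only [List.isEmpty_cons, Bool.false_eq_true, if_false]
  rw [go_fold_CD _ _ _ _ (le_refl _)]
  simp only [List.reverse_nil, List.nil_append]
  have h := go_fold_AB s.length s [] st (le_refl _)
  simpa using h

theorem bLoop_fold (s : List Char) : ∀ (st : List Char),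
    (bLoop s).foldl stepA st = s.foldl stepA st := by
  induction s using bLoop.induct with
  | case1 s h ih =>
    intro st
    rw [bLoop, dif_pos h]
    exact (ih st).trans (bStep_fold s st)
  | case2 s h =>
    intro st
    rw [bLoop, dif_neg h]

theorem bLoop_irred (s : List Char) :
    ¬ ['A','B'] <:+: bLoop s ∧ ¬ ['C','D'] <:+: bLoop s := by
  induction s using bLoop.induct with
  | case1 s h ih =>
    rw [bLoop, dif_pos h]
    exact ih
  | case2 s h =>
    rw [bLoop, dif_neg h]
    simp only [Bool.or_eq_true, not_or] at h
    exact ⟨(PySem.Chars.isIn_eq_false_iff _ _).mp (eq_false_of_ne_true h.1),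
           (PySem.Chars.isIn_eq_false_iff _ _).mp (eq_false_of_ne_true h.2)⟩

-- a string with no "AB"/"CD" substring passes through A's stack unchanged
theorem fold_irred : ∀ (s st : List Char), ¬ ['A','B'] <:+: s → ¬ ['C','D'] <:+: s →
    (∀ t r c q, st = t :: r → s = c :: q → red t c = false) →
    s.foldl stepA st = s.reverse ++ st := by
  intro s
  induction s with
  | nil => intro st _ _ _; simp
  | cons c q ih =>
    intro st hab hcd hj
    have hpush : stepA st c = c :: st := by
      apply stepA_push
      intro t r ht
      exact hj t r c q ht rfl
    have habq : ¬ ['A','B'] <:+: q := fun h => hab (h.trans (List.suffix_cons c q).isInfix)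
    have hcdq : ¬ ['C','D'] <:+: q := fun h => hcd (h.trans (List.suffix_cons c q).isInfix)
    have hjq : ∀ t r d p, c :: st = t :: r → q = d :: p → red t d = false := by
      intro t r d p ht hq
      obtain ⟨htc, -⟩ : c = t ∧ st = r := by simpa using ht
      subst htc; subst hq
      by_cases hr : red c d = true
      · exfalso
        have : (c = 'A' ∧ d = 'B') ∨ (c = 'C' ∧ d = 'D') := by
          simpa [red] using hr
        rcases this with ⟨h1, h2⟩ | ⟨h1, h2⟩ <;> subst h1 <;> subst h2
        · exact hab ⟨[], p, by simp⟩
        · exact hcd ⟨[], p, by simp⟩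
      · simpa using hr
    simp only [List.foldl_cons, hpush]
    rw [ih (c :: st) habq hcdq hjq]
    simp

-- ===== VERDICT (by name: the statement is the Claim_ definition above) =====
theorem minString_spec : Claim_equal_minString := by
  intro s _
  unfold Spec_minString minString minString_alt
  have h1 := bLoop_fold s.toList []
  obtain ⟨hab, hcd⟩ := bLoop_irred s.toList
  have h2 := fold_irred (bLoop s.toList) [] hab hcd (by intro t r c q ht _; cases ht)
  rw [← h1, h2, List.append_nil, List.reverse_reverse]
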